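-- pv_equiv track=rewrite | github.com/j-jae0/Algorithm | 프로그래머스/unrated/160586. 대충 만든 자판/대충 만든 자판.py | solution
-- ===== SOURCE A (Python) =====
-- def solution(keymap, targets):
--     keys = {k:100 for k in ''.join(keymap)}
--     answer = []
--     for key in keymap:
--         for i, k in enumerate(list(key)):
--             if keys[k] > i+1:
--                 keys[k] = i+1
--
--     for target in targets:
--         new_list = []
--         for t in target:
--             if t not in keys.keys():
--                 answer.append(-1)
--                 new_list = []
--                 break
--             else:
--                 new_list.append(keys[t])
--         if len(new_list):
--             answer.append(sum(new_list))
--     return answer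
-- ===== SOURCE B (Python) =====
-- def solution(keymap, targets):
--     cache = {}  # per-character minimal press count, computed on first use (0 = not on the keypad)
--     answer = []
--     for target in targets:
--         if not target:
--             continue  # A emits no entry for an empty target
--         total = 0
--         for t in target:
--             if t in cache:
--                 best = cache[t]
--             else:
--                 best = 0
--                 for row in keymap:
--                     i = 0
--                     for c in row:
--                         i += 1
--                         if c == t:
--                             if best == 0 or i < best:
--                                 best = i
--                             break
--                     if best == 1:
--                         break  # cannot improve on a first-position hit
--                 cache[t] = best
--             if best == 0:
--                 total = -1
--                 break
--             total += best
--         answer.append(total)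
--     return answer
-- ===== Notes on version B (the rewrite author's own statement) =====
-- stated objective: alternative
-- what changed: B drops A's precomputed min-cost dict over all keymap characters: it scans the keymap rows per requested target character (first occurrence per row, running minimum, early stop on a first-position hit), memoises the result per character, and keeps a running integer sum per target.
-- intended difference: On inputs where some target consists entirely of characters that occur in the keymap but at least one of them first occurs at 0-based index >= 100 in every row containing it, A counts that character as 100 presses (its dict is initialised to the sentinel 100, which indices beyond it never update), while B returns the true minimal presses (first index + 1), which is the intended key count. — e.g. on solution(["aaaaaaaaaaaaaaaaaaaaaaaaaaaaaaaaaaaaaaaaaaaaaaaaaaaaaaaaaaaaaaaaaaaaaaaaaaaaaaaaaaaaaaaaaaaaaaaaaaaab"], ["b"]): A returns [100], B returns [101]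
import Mathlib
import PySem

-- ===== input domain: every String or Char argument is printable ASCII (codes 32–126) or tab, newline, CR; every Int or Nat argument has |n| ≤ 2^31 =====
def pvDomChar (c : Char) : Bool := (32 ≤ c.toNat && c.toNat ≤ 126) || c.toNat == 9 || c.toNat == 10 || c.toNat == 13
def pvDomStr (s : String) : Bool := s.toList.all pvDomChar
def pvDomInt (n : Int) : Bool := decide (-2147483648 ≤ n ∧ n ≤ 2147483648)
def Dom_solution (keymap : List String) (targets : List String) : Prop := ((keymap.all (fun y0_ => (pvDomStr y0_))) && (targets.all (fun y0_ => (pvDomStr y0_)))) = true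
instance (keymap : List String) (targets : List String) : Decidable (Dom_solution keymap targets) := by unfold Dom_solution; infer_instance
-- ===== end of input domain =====

-- ===== PORT A =====
-- B drops A's precomputed min-cost dict; it scans the keymap rows per target character instead (alternative decomposition).
-- A's helpers: dict build ({k:100 ...} then the enumerate update loop) and the per-target loop with new_list / break.
def pvKeys0 (keymap : List String) : PySem.Dict Char Int :=
  (PySem.Str.join "" keymap).toList.foldl (fun d k => d.insert k 100) PySem.Dict.empty

-- keys[k] with update; k is always a key of the dict (every char of keymap was inserted), so the none branch is unreachable
def pvStep (d : PySem.Dict Char Int) (p : Int × Char) : PySem.Dict Char Int :=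
  match d.get? p.2 with
  | some v => if v > p.1 + 1 then d.insert p.2 (p.1 + 1) else d
  | none => d

def pvKeys (keymap : List String) : PySem.Dict Char Int :=
  keymap.foldl (fun d key => (PySem.List.enumerate key.toList 0).foldl pvStep d) (pvKeys0 keymap)

-- the per-target loop: returns the entries this target appends to answer ([-1], [sum new_list], or [])
def pvInner (keys : PySem.Dict Char Int) (ts : List Char) (newList : List Int) : List Int :=
  match ts with
  | [] => if newList.length ≠ 0 then [newList.sum] else []
  | t :: rest =>
    match keys.get? t with
    | none => [-1]
    | some v => pvInner keys rest (newList ++ [v])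

def solution (keymap : List String) (targets : List String) : List Int :=
  let keys := pvKeys keymap
  targets.foldl (fun answer target => answer ++ pvInner keys target.toList []) []

-- ===== PORT B =====
def pvRowScan (row : List Char) (t : Char) (i : Int) (best : Int) : Int :=
  match row with
  | [] => best
  | c :: rest =>
    if c == t then (if best = 0 ∨ i + 1 < best then i + 1 else best)
    else pvRowScan rest t (i + 1) best

-- the row loop with its early break ('if best == 1: break')
def pvScanRows (keymap : List String) (t : Char) (best : Int) : Int :=
  match keymap with
  | [] => best
  | row :: rest =>
    let b := pvRowScan row.toList t 0 best
    if b = 1 then b else pvScanRows rest t b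

-- 'if t in cache: ... else: scan and store'
def pvLookup (keymap : List String) (cache : PySem.Dict Char Int) (t : Char) :
    Int × PySem.Dict Char Int :=
  match cache.get? t with
  | some v => (v, cache)
  | none =>
    let b := pvScanRows keymap t 0
    (b, cache.insert t b)

def pvTargetScan (keymap : List String) (ts : List Char) (total : Int)
    (cache : PySem.Dict Char Int) : Int × PySem.Dict Char Int :=
  match ts with
  | [] => (total, cache)
  | t :: rest =>
    let p := pvLookup keymap cache t
    if p.1 = 0 then (-1, p.2) else pvTargetScan keymap rest (total + p.1) p.2

def solution_alt (keymap : List String) (targets : List String) : List Int :=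
  (targets.foldl (fun acc target =>
    if target.toList = [] then acc
    else
      let p := pvTargetScan keymap target.toList 0 acc.2
      (acc.1 ++ [p.1], p.2)) (([] : List Int), (PySem.Dict.empty : PySem.Dict Char Int))).1

-- ===== PRECONDITION & SPEC =====
-- On inputs where some target consists entirely of characters occurring in the keymap but at least one of them first
-- occurs at 0-based index >= 100 in every row containing it, A counts that character as 100 presses (its dict is
-- initialised to the sentinel 100, which indices beyond it never update), while B returns the true minimal presses
-- (first index + 1), which is the intended key count.
def D_solution (keymap : List String) (targets : List String) : Prop :=
  (keymap.any (fun row => decide (100 < row.toList.length))) = true ∧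
  ∃ t ∈ targets, (∀ c ∈ t.toList, keymap.any (fun row => row.toList.contains c) = true) ∧
    (∃ c ∈ t.toList, keymap.all (fun row => !(row.toList.take 100).contains c) = true)
instance (keymap : List String) (targets : List String) : Decidable (D_solution keymap targets) := by
  unfold D_solution; infer_instance

def Spec_solution (keymap : List String) (targets : List String) (out : List Int) : Prop :=
  ¬ D_solution keymap targets → out = solution_alt keymap targets
instance (keymap : List String) (targets : List String) (out : List Int) : Decidable (Spec_solution keymap targets out) := by
  unfold Spec_solution; infer_instance

def pvDiffWitness_solution : List String × List String := (["aaaaaaaaaaaaaaaaaaaaaaaaaaaaaaaaaaaaaaaaaaaaaaaaaaaaaaaaaaaaaaaaaaaaaaaaaaaaaaaaaaaaaaaaaaaaaaaaaaaab"], ["b"])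
def pvDiffWitnessOut_solution : (List Int) × (List Int) := ([100], [101])

-- ===== CLAIM (what is proved, stated in full; the proofs are below) =====
def Claim_unchanged_solution : Prop := ∀ (keymap : List String) (targets : List String), Dom_solution keymap targets → Spec_solution keymap targets (solution keymap targets)
def Claim_changed_solution : Prop := Dom_solution (pvDiffWitness_solution.1) (pvDiffWitness_solution.2) ∧ D_solution (pvDiffWitness_solution.1) (pvDiffWitness_solution.2) ∧ solution (pvDiffWitness_solution.1) (pvDiffWitness_solution.2) = pvDiffWitnessOut_solution.1 ∧ solution_alt (pvDiffWitness_solution.1) (pvDiffWitness_solution.2) = pvDiffWitnessOut_solution.2 ∧ pvDiffWitnessOut_solution.1 ≠ pvDiffWitnessOut_solution.2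

def Claim_exact_solution : Prop := ∀ (keymap : List String) (targets : List String), Dom_solution keymap targets → D_solution keymap targets → solution keymap targets ≠ solution_alt keymap targets

-- ===== LEMMAS AND PROOFS =====

-- proof-side reference versions of B's loops (no cache, no early break)
def pvCharBest (keymap : List String) (t : Char) : Int :=
  keymap.foldl (fun best row => pvRowScan row.toList t 0 best) 0

def pvPureScan (keymap : List String) : List Char → Int → Int
  | [], total => total
  | t :: rest, total =>
    if pvCharBest keymap t = 0 then -1 else pvPureScan keymap rest (total + pvCharBest keymap t)

-- the cache invariant: every stored value is the reference cost
def pvInv (keymap : List String) (cache : PySem.Dict Char Int) : Prop :=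
  ∀ c v, cache.get? c = some v → v = pvCharBest keymap c

-- B-side characterisation: pvRowScan finds the first index of t (1-based, offset i) and min-combines it with best
lemma rowScan_eq (t : Char) (row : List Char) : ∀ (i best : Int),
    pvRowScan row t i best =
      (row.findIdx? (· == t)).elim best
        (fun j => if best = 0 ∨ i + (j : Int) + 1 < best then i + (j : Int) + 1 else best) := by
  induction row with
  | nil => intro i best; simp [pvRowScan]
  | cons c rest ih =>
    intro i best
    rw [List.findIdx?_cons]
    by_cases h : c == t
    · simp [pvRowScan, h]
    · simp only [pvRowScan, h, Bool.false_eq_true, if_false, ih]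
      cases hf : rest.findIdx? (· == t) with
      | none => simp
      | some j =>
        simp only [Option.map_some, Option.elim_some]
        have h1 : i + 1 + (j : Int) + 1 = i + ((j + 1 : Nat) : Int) + 1 := by push_cast; ring
        rw [h1]

lemma findIdx?_none_iff_not_mem (c : Char) (l : List Char) :
    l.findIdx? (· == c) = none ↔ c ∉ l := by
  rw [List.findIdx?_eq_none_iff]
  constructor
  · intro h hc; have := h c hc; simp at this
  · intro h x hx; simp; rintro rfl; exact h hx

lemma findIdx?_some_mem (c : Char) (l : List Char) (j : Nat)
    (h : l.findIdx? (· == c) = some j) : c ∈ l := by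
  by_contra hc
  rw [(findIdx?_none_iff_not_mem c l).mpr hc] at h
  simp at h

lemma foldB_nonneg (c : Char) (rows : List String) : ∀ best : Int, 0 ≤ best →
    0 ≤ rows.foldl (fun b row => pvRowScan row.toList c 0 b) best := by
  induction rows with
  | nil => intro best h; simpa using h
  | cons r rest ih =>
    intro best h
    simp only [List.foldl_cons]
    apply ih
    rw [rowScan_eq]
    cases hf : r.toList.findIdx? (· == c) with
    | none => simpa using h
    | some j => simp only [Option.elim_some]; split_ifs <;> omega

lemma foldB_pos (c : Char) (rows : List String) : ∀ best : Int, 0 < best →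
    0 < rows.foldl (fun b row => pvRowScan row.toList c 0 b) best ∧
    rows.foldl (fun b row => pvRowScan row.toList c 0 b) best ≤ best := by
  induction rows with
  | nil => intro best h; simp [h]
  | cons r rest ih =>
    intro best h
    simp only [List.foldl_cons]
    have hb : 0 < pvRowScan r.toList c 0 best ∧ pvRowScan r.toList c 0 best ≤ best := by
      rw [rowScan_eq]
      cases hf : r.toList.findIdx? (· == c) with
      | none => simp [h]
      | some j => simp only [Option.elim_some]; split_ifs <;> omega
    obtain ⟨h1, h2⟩ := ih _ hb.1
    exact ⟨h1, le_trans h2 hb.2⟩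

lemma foldB_zero (c : Char) (rows : List String) : ∀ best : Int, 0 ≤ best →
    (rows.foldl (fun b row => pvRowScan row.toList c 0 b) best = 0 ↔
      best = 0 ∧ ∀ row ∈ rows, c ∉ row.toList) := by
  induction rows with
  | nil => intro best h; simp
  | cons r rest ih =>
    intro best h
    simp only [List.foldl_cons]
    cases hf : r.toList.findIdx? (· == c) with
    | none =>
      have hs : pvRowScan r.toList c 0 best = best := by rw [rowScan_eq, hf]; simp
      rw [hs, ih best h]
      have hnm : c ∉ r.toList := (findIdx?_none_iff_not_mem c r.toList).mp hf
      simp [hnm]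
    | some j =>
      have hpos : 0 < pvRowScan r.toList c 0 best := by
        rw [rowScan_eq, hf]; simp only [Option.elim_some]; split_ifs <;> omega
      have := (foldB_pos c rest _ hpos).1
      have hmem : c ∈ r.toList := findIdx?_some_mem c r.toList j hf
      constructor
      · intro h0; omega
      · rintro ⟨-, hall⟩; exact absurd hmem (hall r (by simp))

lemma charBest_nonneg (km : List String) (c : Char) : 0 ≤ pvCharBest km c :=
  foldB_nonneg c km 0 le_rfl

lemma charBest_eq_zero_iff (km : List String) (c : Char) :
    pvCharBest km c = 0 ↔ ∀ row ∈ km, c ∉ row.toList := by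
  unfold pvCharBest
  rw [foldB_zero c km 0 le_rfl]
  simp

lemma mem_take_findIdx (c : Char) (l : List Char) : ∀ n : Nat, c ∈ l.take n →
    ∃ j, l.findIdx? (· == c) = some j ∧ j < n := by
  induction l with
  | nil => intro n h; simp at h
  | cons x rest ih =>
    intro n h
    cases n with
    | zero => simp at h
    | succ m =>
      rw [List.take_succ_cons] at h
      rw [List.findIdx?_cons]
      by_cases hx : x == c
      · exact ⟨0, by simp [hx], by omega⟩
      · have hc : c ∈ rest.take m := by
          rcases List.mem_cons.mp h with h1 | h1
          · exact absurd (by simp [h1] : x == c) (by simpa using hx)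
          · exact h1
        obtain ⟨j, hj, hjn⟩ := ih m hc
        exact ⟨j + 1, by simp [hx, hj], by omega⟩

lemma charBest_le_of_take (km : List String) (c : Char) (r : String)
    (hr : r ∈ km) (ht : c ∈ r.toList.take 100) :
    0 < pvCharBest km c ∧ pvCharBest km c ≤ 100 := by
  obtain ⟨pre, suf, rfl⟩ := List.mem_iff_append.mp hr
  unfold pvCharBest
  rw [List.foldl_append, List.foldl_cons]
  obtain ⟨j, hj, hjn⟩ := mem_take_findIdx c r.toList 100 ht
  set b0 : Int := pre.foldl (fun b row => pvRowScan row.toList c 0 b) 0 with hb0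
  have hb0n : 0 ≤ b0 := foldB_nonneg c pre 0 le_rfl
  have hb1 : 0 < pvRowScan r.toList c 0 b0 ∧ pvRowScan r.toList c 0 b0 ≤ 100 := by
    rw [rowScan_eq, hj]; simp only [Option.elim_some]; split_ifs <;> omega
  obtain ⟨p1, p2⟩ := foldB_pos c suf _ hb1.1
  exact ⟨p1, le_trans p2 hb1.2⟩

-- A-side: the dict comprehension
lemma keys0_fold_get (c : Char) (l : List Char) : ∀ d : PySem.Dict Char Int,
    (l.foldl (fun d k => d.insert k 100) d).get? c = if c ∈ l then some 100 else d.get? c := by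
  induction l with
  | nil => intro d; simp
  | cons k rest ih =>
    intro d
    simp only [List.foldl_cons, ih]
    by_cases hm : c ∈ rest
    · simp [hm]
    · rw [PySem.Dict.get?_insert]
      by_cases he : c = k <;> simp [hm, he]

lemma join_nil_flatten (parts : List (List Char)) : PySem.Chars.join [] parts = parts.flatten := by
  induction parts with
  | nil => simp [pysem]
  | cons a t ih =>
    cases t with
    | nil => simp [pysem]
    | cons b t2 => rw [PySem.Chars.join_cons_cons]; simp_all

lemma keys0_get (km : List String) (c : Char) :
    (pvKeys0 km).get? c = if (∃ r ∈ km, c ∈ r.toList) then some 100 else none := by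
  unfold pvKeys0
  rw [keys0_fold_get]
  have hj : (PySem.Str.join "" km).toList = (km.map String.toList).flatten := by
    simp [pysem, join_nil_flatten]
  have hm : c ∈ (PySem.Str.join "" km).toList ↔ ∃ r ∈ km, c ∈ r.toList := by
    rw [hj]; simp [List.mem_flatten]
  rw [PySem.Dict.get?_empty]
  by_cases h : ∃ r ∈ km, c ∈ r.toList
  · rw [if_pos (hm.mpr h), if_pos h]
  · rw [if_neg (fun hc => h (hm.mp hc)), if_neg h]

-- A-side: one row of the update pass
lemma step_get (c : Char) (key : List Char) : ∀ (s : Int) (d : PySem.Dict Char Int),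
    ((PySem.List.enumerate key s).foldl pvStep d).get? c =
      (d.get? c).map (fun v => (key.findIdx? (· == c)).elim v
        (fun j => if v > s + (j : Int) + 1 then s + (j : Int) + 1 else v)) := by
  induction key with
  | nil =>
    intro s d
    simp [PySem.List.enumerate_nil]
  | cons k rest ih =>
    intro s d
    rw [PySem.List.enumerate_cons, List.foldl_cons, List.findIdx?_cons]
    by_cases hk : k == c
    · have hkc : k = c := by simpa using hk
      subst hkc
      simp only [hk]
      cases hd : d.get? k with
      | none =>
        have hstep : pvStep d (s, k) = d := by unfold pvStep; simp [hd]
        rw [hstep, ih, hd]; simp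
      | some v =>
        by_cases hv : v > s + 1
        · have hstep : pvStep d (s, k) = d.insert k (s + 1) := by
            unfold pvStep; simp [hd, hv]
          rw [hstep, ih, PySem.Dict.get?_insert_self]
          simp only [Option.map_some, Option.elim_some, if_true, Nat.cast_zero]
          cases hf : rest.findIdx? (· == k) with
          | none =>
            simp only [Option.elim_none]
            congr 1
            rw [if_pos (by omega : v > s + 0 + 1)]
            ring
          | some j =>
            simp only [Option.elim_some]
            congr 1
            rw [if_neg (by omega : ¬ (s + 1 > s + 1 + (j : Int) + 1)),
                if_pos (by omega : v > s + 0 + 1)]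
            ring
        · have hstep : pvStep d (s, k) = d := by unfold pvStep; simp [hd, hv]
          rw [hstep, ih, hd]
          simp only [Option.map_some, Option.elim_some, if_true, Nat.cast_zero]
          cases hf : rest.findIdx? (· == k) with
          | none =>
            simp only [Option.elim_none]
            congr 1
            rw [if_neg (by omega : ¬ (v > s + 0 + 1))]
          | some j =>
            simp only [Option.elim_some]
            congr 1
            rw [if_neg (by omega : ¬ (v > s + 1 + (j : Int) + 1)),
                if_neg (by omega : ¬ (v > s + 0 + 1))]
    · have hne : c ≠ k := by intro h; apply hk; simp [h]
      have hstep : (pvStep d (s, k)).get? c = d.get? c := by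
        unfold pvStep
        cases hd : d.get? k with
        | none => rfl
        | some v =>
          simp only
          split_ifs with h
          · rw [PySem.Dict.get?_insert]; simp [hne]
          · rfl
      rw [ih, hstep]
      simp only [hk, Bool.false_eq_true, if_false]
      cases hd : d.get? c with
      | none => simp
      | some v =>
        simp only [Option.map_some]
        cases hf : rest.findIdx? (· == c) with
        | none => simp
        | some j =>
          simp only [Option.map_some, Option.elim_some]
          congr 1
          have h1 : s + 1 + (j : Int) + 1 = s + ((j + 1 : Nat) : Int) + 1 := by push_cast; ring
          rw [h1]

-- A-side: the whole update pass
lemma pass2_get (c : Char) (rows : List String) : ∀ d : PySem.Dict Char Int,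
    ((rows.foldl (fun d key => (PySem.List.enumerate key.toList 0).foldl pvStep d) d).get? c) =
      (d.get? c).map (fun v => rows.foldl (fun v row =>
        (row.toList.findIdx? (· == c)).elim v
          (fun j => if v > (j : Int) + 1 then (j : Int) + 1 else v)) v) := by
  induction rows with
  | nil => intro d; simp
  | cons r rest ih =>
    intro d
    simp only [List.foldl_cons]
    rw [ih, step_get]
    cases hd : d.get? c with
    | none => simp
    | some v =>
      simp only [Option.map_some]
      congr 1
      cases hf : r.toList.findIdx? (· == c) with
      | none => simp
      | some j => simp

-- relating A's capped fold (start 100) with B's fold (start 0)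
lemma fold_relate (c : Char) (rows : List String) : ∀ (v best : Int),
    0 ≤ best → v = (if best = 0 then 100 else min 100 best) →
    rows.foldl (fun v row =>
        (row.toList.findIdx? (· == c)).elim v
          (fun j => if v > (j : Int) + 1 then (j : Int) + 1 else v)) v =
      (if rows.foldl (fun b row => pvRowScan row.toList c 0 b) best = 0 then 100
       else min 100 (rows.foldl (fun b row => pvRowScan row.toList c 0 b) best)) := by
  induction rows with
  | nil => intro v best h hv; simpa using hv
  | cons r rest ih =>
    intro v best h hv
    simp only [List.foldl_cons]
    cases hf : r.toList.findIdx? (· == c) with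
    | none =>
      have hs : pvRowScan r.toList c 0 best = best := by rw [rowScan_eq, hf]; simp
      rw [hs]
      simp only [Option.elim_none]
      exact ih v best h hv
    | some j =>
      have hs : pvRowScan r.toList c 0 best =
          (if best = 0 ∨ 0 + (j : Int) + 1 < best then 0 + (j : Int) + 1 else best) := by
        rw [rowScan_eq, hf]; simp
      simp only [Option.elim_some]
      rw [hs]
      apply ih
      · split_ifs <;> omega
      · split_ifs <;> omega

-- A's final per-character cost: absent ↔ pvCharBest = 0, else min 100 (pvCharBest)
lemma keys_get_eq (km : List String) (c : Char) :
    (pvKeys km).get? c =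
      if pvCharBest km c = 0 then none else some (min 100 (pvCharBest km c)) := by
  unfold pvKeys
  rw [pass2_get, keys0_get]
  by_cases h : ∃ r ∈ km, c ∈ r.toList
  · have hnz : pvCharBest km c ≠ 0 := by
      intro h0
      rw [charBest_eq_zero_iff] at h0
      obtain ⟨r, hr, hc⟩ := h
      exact h0 r hr hc
    rw [if_pos h, if_neg hnz]
    simp only [Option.map_some]
    congr 1
    have hrel := fold_relate c km 100 0 le_rfl (by simp)
    rw [hrel]
    unfold pvCharBest at hnz ⊢
    rw [if_neg hnz]
  · have hz : pvCharBest km c = 0 := by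
      rw [charBest_eq_zero_iff]
      intro row hrow hc
      exact h ⟨row, hrow, hc⟩
    rw [if_neg h, if_pos hz]
    simp

-- per-target: some character entirely missing ⇒ both sides yield a single -1
lemma inner_missing (km : List String) : ∀ (ts : List Char) (nl : List Int) (total : Int),
    (∃ t ∈ ts, pvCharBest km t = 0) →
    pvInner (pvKeys km) ts nl = [-1] ∧ pvPureScan km ts total = -1 := by
  intro ts
  induction ts with
  | nil => intro nl total h; simp at h
  | cons t rest ih =>
    intro nl total h
    by_cases hz : pvCharBest km t = 0
    · have hg : (pvKeys km).get? t = none := by rw [keys_get_eq, if_pos hz]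
      constructor
      · simp [pvInner, hg]
      · simp [pvPureScan, hz]
    · have hg : (pvKeys km).get? t = some (min 100 (pvCharBest km t)) := by
        rw [keys_get_eq, if_neg hz]
      have hrest : ∃ u ∈ rest, pvCharBest km u = 0 := by
        obtain ⟨u, hu, hz'⟩ := h
        rcases List.mem_cons.mp hu with rfl | hu'
        · exact absurd hz' hz
        · exact ⟨u, hu', hz'⟩
      constructor
      · simp only [pvInner, hg]
        exact (ih (nl ++ [min 100 (pvCharBest km t)]) 0 hrest).1
      · simp only [pvPureScan, if_neg hz]
        exact (ih nl (total + pvCharBest km t) hrest).2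

-- per-target: every character present with true cost ≤ 100 ⇒ identical entries
lemma inner_ok (km : List String) : ∀ (ts : List Char) (nl : List Int) (total : Int),
    (∀ t ∈ ts, 0 < pvCharBest km t ∧ pvCharBest km t ≤ 100) →
    total = nl.sum →
    pvInner (pvKeys km) ts nl =
      (if nl.length + ts.length ≠ 0 then [pvPureScan km ts total] else []) := by
  intro ts
  induction ts with
  | nil =>
    intro nl total hall htot
    simp [pvInner, pvPureScan, htot]
  | cons t rest ih =>
    intro nl total hall htot
    obtain ⟨hpos, hle⟩ := hall t (by simp)
    have hz : pvCharBest km t ≠ 0 := by omega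
    have hmin : min 100 (pvCharBest km t) = pvCharBest km t := by omega
    have hg : (pvKeys km).get? t = some (pvCharBest km t) := by
      rw [keys_get_eq, if_neg hz, hmin]
    simp only [pvInner, hg]
    rw [ih (nl ++ [pvCharBest km t]) (total + pvCharBest km t)
        (fun u hu => hall u (by simp [hu])) (by simp [htot])]
    simp only [pvPureScan, if_neg hz]
    simp

-- per-target: outside D_, each target contributes the same entries on both sides
lemma per_target (km : List String) (u : String)
    (hu : (∀ c ∈ u.toList, km.any (fun row => row.toList.contains c) = true) →
      ¬ ∃ c ∈ u.toList, km.all (fun row => !(row.toList.take 100).contains c) = true) :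
    pvInner (pvKeys km) u.toList [] =
      (if u.toList = [] then [] else [pvPureScan km u.toList 0]) := by
  by_cases hMiss : ∃ c ∈ u.toList, pvCharBest km c = 0
  · have hne : u.toList ≠ [] := by
      obtain ⟨c0, hc0, -⟩ := hMiss
      intro h; rw [h] at hc0; simp at hc0
    rw [if_neg hne]
    obtain ⟨h1, h2⟩ := inner_missing km u.toList [] 0 hMiss
    rw [h1, h2]
  · push Not at hMiss
    have hpresent : ∀ c' ∈ u.toList, km.any (fun row => row.toList.contains c') = true := by
      intro c' hc'
      have hnz' := hMiss c' hc'
      rw [ne_eq, charBest_eq_zero_iff] at hnz'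
      push Not at hnz'
      obtain ⟨row, hrow, hcrow⟩ := hnz'
      rw [List.any_eq_true]
      exact ⟨row, hrow, by simpa using hcrow⟩
    have hfar := hu hpresent
    push Not at hfar
    have hall : ∀ c ∈ u.toList, 0 < pvCharBest km c ∧ pvCharBest km c ≤ 100 := by
      intro c hc
      have hpos : 0 < pvCharBest km c :=
        lt_of_le_of_ne (charBest_nonneg km c) (Ne.symm (hMiss c hc))
      have hnall := hfar c hc
      have hex : ∃ row ∈ km, c ∈ row.toList.take 100 := by
        by_contra hno
        push Not at hno
        apply hnall
        rw [List.all_eq_true]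
        intro row hrow
        simpa using hno row hrow
      obtain ⟨row, hrow, hmem⟩ := hex
      exact ⟨hpos, (charBest_le_of_take km c row hrow hmem).2⟩
    rw [inner_ok km u.toList [] 0 hall rfl]
    by_cases he : u.toList = []
    · simp [he]
    · have hs : ¬ u = "" := fun h => he (by simp [h])
      simp [hs]


-- early break is sound: pvScanRows equals the plain fold
lemma rowScan_nonneg (row : List Char) (t : Char) (best : Int) (h : 0 ≤ best) :
    0 ≤ pvRowScan row t 0 best := by
  rw [rowScan_eq]
  cases hf : row.findIdx? (· == t) with
  | none => simpa using h
  | some j => simp only [Option.elim_some]; split_ifs <;> omega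

lemma scanRows_eq (t : Char) (keymap : List String) : ∀ best : Int, 0 ≤ best →
    pvScanRows keymap t best = keymap.foldl (fun b row => pvRowScan row.toList t 0 b) best := by
  induction keymap with
  | nil => intro best h; rfl
  | cons row rest ih =>
    intro best h
    simp only [pvScanRows, List.foldl_cons]
    by_cases hb : pvRowScan row.toList t 0 best = 1
    · rw [if_pos hb, hb]
      have := foldB_pos t rest 1 (by omega)
      omega
    · rw [if_neg hb]
      exact ih _ (rowScan_nonneg row.toList t best h)

lemma scanRows_charBest (keymap : List String) (t : Char) :
    pvScanRows keymap t 0 = pvCharBest keymap t :=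
  scanRows_eq t keymap 0 le_rfl

lemma lookup_fst (keymap : List String) (cache : PySem.Dict Char Int) (t : Char)
    (hinv : pvInv keymap cache) : (pvLookup keymap cache t).1 = pvCharBest keymap t := by
  unfold pvLookup
  cases hc : cache.get? t with
  | some v => exact hinv t v hc
  | none => simpa using scanRows_charBest keymap t

lemma lookup_inv (keymap : List String) (cache : PySem.Dict Char Int) (t : Char)
    (hinv : pvInv keymap cache) : pvInv keymap (pvLookup keymap cache t).2 := by
  unfold pvLookup
  cases hc : cache.get? t with
  | some v => exact hinv
  | none =>
    intro c v hv
    simp only at hv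
    rw [PySem.Dict.get?_insert] at hv
    split_ifs at hv with he
    · cases hv; rw [he]; exact scanRows_charBest keymap t
    · exact hinv c v hv

lemma targetScan_spec (keymap : List String) : ∀ (ts : List Char) (total : Int)
    (cache : PySem.Dict Char Int), pvInv keymap cache →
    (pvTargetScan keymap ts total cache).1 = pvPureScan keymap ts total ∧
    pvInv keymap (pvTargetScan keymap ts total cache).2 := by
  intro ts
  induction ts with
  | nil => intro total cache hinv; exact ⟨rfl, hinv⟩
  | cons t rest ih =>
    intro total cache hinv
    have h1 := lookup_fst keymap cache t hinv
    have h2 := lookup_inv keymap cache t hinv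
    simp only [pvTargetScan, pvPureScan, h1]
    by_cases hz : pvCharBest keymap t = 0
    · simp [hz, h2]
    · rw [if_neg hz, if_neg hz]
      exact ih (total + pvCharBest keymap t) _ h2

lemma alt_fold_aux (keymap : List String) : ∀ (ts : List String) (ans : List Int)
    (cache : PySem.Dict Char Int), pvInv keymap cache →
    (ts.foldl (fun acc target =>
      if target.toList = [] then acc
      else
        let p := pvTargetScan keymap target.toList 0 acc.2
        (acc.1 ++ [p.1], p.2)) (ans, cache)).1 =
      ans ++ ts.flatMap (fun u => if u.toList = [] then [] else [pvPureScan keymap u.toList 0]) := by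
  intro ts
  induction ts with
  | nil => intro ans cache _; simp
  | cons u rest ih =>
    intro ans cache hinv
    simp only [List.foldl_cons, List.flatMap_cons]
    by_cases hu : u.toList = []
    · rw [if_pos hu, ih ans cache hinv, if_pos hu]
      simp
    · rw [if_neg hu]
      obtain ⟨h1, h2⟩ := targetScan_spec keymap u.toList 0 cache hinv
      rw [ih _ _ h2, if_neg hu, h1]
      simp [List.append_assoc]

lemma alt_eq_flatMap (keymap : List String) (targets : List String) :
    solution_alt keymap targets = targets.flatMap (fun u =>
      if u.toList = [] then [] else [pvPureScan keymap u.toList 0]) := by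
  unfold solution_alt
  rw [alt_fold_aux keymap targets [] PySem.Dict.empty
    (fun c v h => by rw [PySem.Dict.get?_empty] at h; cases h)]
  simp

lemma solution_eq_flatMap (keymap : List String) (targets : List String) :
    solution keymap targets = targets.flatMap (fun u => pvInner (pvKeys keymap) u.toList []) := by
  unfold solution
  rw [PySem.List.foldl_append_eq_flatMap]
  simp

-- the inputs of D_: a present character that no row shows in its first 100 keys costs more than 100
lemma findIdx_lt_mem_take (c : Char) (l : List Char) : ∀ (n j : Nat),
    l.findIdx? (· == c) = some j → j < n → c ∈ l.take n := by
  induction l with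
  | nil => intro n j h; simp at h
  | cons x rest ih =>
    intro n j h hj
    rw [List.findIdx?_cons] at h
    by_cases hx : x == c
    · cases n with
      | zero => omega
      | succ m =>
        have : x = c := by simpa using hx
        simp [this]
    · simp only [hx, Bool.false_eq_true, if_false] at h
      cases hf : rest.findIdx? (· == c) with
      | none => rw [hf] at h; simp at h
      | some j' =>
        rw [hf] at h
        simp only [Option.map_some, Option.some.injEq] at h
        cases n with
        | zero => omega
        | succ m =>
          rw [List.take_succ_cons]
          exact List.mem_cons_of_mem x (ih m j' hf (by omega))

lemma foldB_gt (c : Char) (rows : List String)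
    (hall : ∀ row ∈ rows, c ∉ row.toList.take 100) : ∀ best : Int,
    (best = 0 ∨ 100 < best) →
    (rows.foldl (fun b row => pvRowScan row.toList c 0 b) best = 0 ∨
     100 < rows.foldl (fun b row => pvRowScan row.toList c 0 b) best) := by
  induction rows with
  | nil => intro best h; simpa using h
  | cons r rest ih =>
    intro best h
    simp only [List.foldl_cons]
    have hr : pvRowScan r.toList c 0 best = 0 ∨ 100 < pvRowScan r.toList c 0 best := by
      rw [rowScan_eq]
      cases hf : r.toList.findIdx? (· == c) with
      | none => simpa using h
      | some j =>
        have hj : 100 ≤ j := by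
          by_contra hlt
          exact hall r (by simp) (findIdx_lt_mem_take c r.toList 100 j hf (by omega))
        simp only [Option.elim_some]
        split_ifs <;> omega
    exact ih (fun row hrow => hall row (by simp [hrow])) _ hr

lemma charBest_gt_100 (km : List String) (c : Char)
    (hnz : pvCharBest km c ≠ 0) (hfar : ∀ row ∈ km, c ∉ row.toList.take 100) :
    100 < pvCharBest km c := by
  have := foldB_gt c km hfar 0 (Or.inl rfl)
  unfold pvCharBest at hnz ⊢
  omega

-- A's entry for a target with no missing character, as an explicit capped sum
lemma innerA_sum (km : List String) : ∀ (ts : List Char) (nl : List Int),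
    (∀ c ∈ ts, pvCharBest km c ≠ 0) →
    pvInner (pvKeys km) ts nl =
      (if nl.length + ts.length ≠ 0
       then [nl.sum + (ts.map (fun c => min 100 (pvCharBest km c))).sum] else []) := by
  intro ts
  induction ts with
  | nil =>
    intro nl _
    by_cases h : nl.length = 0
    · have : nl = [] := List.length_eq_zero_iff.mp h
      simp [pvInner, this]
    · simp [pvInner, h]
  | cons t rest ih =>
    intro nl hall
    have hz : pvCharBest km t ≠ 0 := hall t (by simp)
    have hg : (pvKeys km).get? t = some (min 100 (pvCharBest km t)) := by
      rw [keys_get_eq, if_neg hz]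
    simp only [pvInner, hg]
    rw [ih (nl ++ [min 100 (pvCharBest km t)]) (fun c hc => hall c (by simp [hc]))]
    simp [List.sum_append]
    ring

lemma pureScan_sum (km : List String) : ∀ (ts : List Char) (total : Int),
    (∀ c ∈ ts, pvCharBest km c ≠ 0) →
    pvPureScan km ts total = total + (ts.map (pvCharBest km)).sum := by
  intro ts
  induction ts with
  | nil => intro total _; simp [pvPureScan]
  | cons t rest ih =>
    intro total hall
    have hz : pvCharBest km t ≠ 0 := hall t (by simp)
    simp only [pvPureScan, if_neg hz]
    rw [ih (total + pvCharBest km t) (fun c hc => hall c (by simp [hc]))]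
    simp
    ring

lemma flatMap_eq_of_lengths (f g : String → List Int) : ∀ (ts : List String),
    (∀ t ∈ ts, (f t).length = (g t).length) →
    ts.flatMap f = ts.flatMap g → ∀ t ∈ ts, f t = g t := by
  intro ts
  induction ts with
  | nil => intro _ _ t ht; simp at ht
  | cons u rest ih =>
    intro hlen heq t ht
    simp only [List.flatMap_cons] at heq
    obtain ⟨h1, h2⟩ := List.append_inj heq (hlen u (by simp))
    rcases List.mem_cons.mp ht with rfl | ht'
    · exact h1
    · exact ih (fun v hv => hlen v (by simp [hv])) h2 t ht'

-- presence plus a missed 100-prefix forces a row longer than 100 keys (the cheap gate of D_)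
lemma gate_of_far (km : List String) (c : Char)
    (hp : km.any (fun row => row.toList.contains c) = true)
    (hf : km.all (fun row => !(row.toList.take 100).contains c) = true) :
    (km.any (fun row => decide (100 < row.toList.length))) = true := by
  rw [List.any_eq_true] at hp ⊢
  obtain ⟨row, hrow, hcon⟩ := hp
  refine ⟨row, hrow, ?_⟩
  rw [List.all_eq_true] at hf
  have hnt : c ∉ row.toList.take 100 := by simpa using hf row hrow
  have hmem : c ∈ row.toList := by simpa using hcon
  simp only [decide_eq_true_eq]
  by_contra hle
  exact hnt (by rwa [List.take_of_length_le (by omega)])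
-- ===== VERDICT (by name: the statement is the Claim_ definition above) =====
theorem solution_spec : Claim_unchanged_solution := by
  intro km ts hDom hnd
  show solution km ts = solution_alt km ts
  rw [solution_eq_flatMap, alt_eq_flatMap]
  apply List.flatMap_congr
  intro u hu
  apply per_target
  intro hpres hex
  unfold D_solution at hnd
  obtain ⟨c, hc, hfarc⟩ := hex
  exact hnd ⟨gate_of_far km c (hpres c hc) hfarc, u, hu, hpres, c, hc, hfarc⟩

set_option maxRecDepth 4096 in
theorem solution_changed : Claim_changed_solution := by
  unfold Claim_changed_solution D_solution pvDiffWitness_solution pvDiffWitnessOut_solution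
  refine ⟨by decide, ⟨by decide, "b", by simp, ?_, ?_⟩, by decide, by decide, by decide⟩
  · intro c hc
    have hcb : c = 'b' := by simpa using hc
    subst hcb; decide
  · exact ⟨'b', by simp, by decide⟩

theorem solution_tight : Claim_exact_solution := by
  intro km ts hDom hD h
  unfold D_solution at hD
  obtain ⟨hgate, u, hu, hpres, c0, hc0, hfarc⟩ := hD
  have hpresB : ∀ c ∈ u.toList, pvCharBest km c ≠ 0 := by
    intro c hc
    have hp := hpres c hc
    rw [List.any_eq_true] at hp
    obtain ⟨row, hrow, hcon⟩ := hp
    rw [ne_eq, charBest_eq_zero_iff]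
    push Not
    exact ⟨row, hrow, by simpa using hcon⟩
  have hfar' : ∀ row ∈ km, c0 ∉ row.toList.take 100 := by
    intro row hrow
    rw [List.all_eq_true] at hfarc
    simpa using hfarc row hrow
  have hgt : 100 < pvCharBest km c0 := charBest_gt_100 km c0 (hpresB c0 hc0) hfar'
  rw [solution_eq_flatMap, alt_eq_flatMap] at h
  have hlen : ∀ t ∈ ts, (pvInner (pvKeys km) t.toList []).length =
      ((if t.toList = [] then [] else [pvPureScan km t.toList 0]) : List Int).length := by
    intro t _
    by_cases he : t.toList = []
    · simp [pvInner, he]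
    · rw [if_neg he]
      by_cases hMiss : ∃ c ∈ t.toList, pvCharBest km c = 0
      · rw [(inner_missing km t.toList [] 0 hMiss).1]
        rfl
      · push Not at hMiss
        rw [innerA_sum km t.toList [] hMiss]
        have hlen0 : t.toList.length ≠ 0 := fun h0 => he (List.length_eq_zero_iff.mp h0)
        rw [if_pos (by simpa using hlen0)]
        rfl
  have heq := flatMap_eq_of_lengths _ _ ts hlen h u hu
  have hne : u.toList ≠ [] := fun hnil => by rw [hnil] at hc0; simp at hc0
  rw [if_neg hne, innerA_sum km u.toList [] hpresB,
    pureScan_sum km u.toList 0 hpresB] at heq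
  have hlt : (u.toList.map (fun c => min 100 (pvCharBest km c))).sum <
      (u.toList.map (pvCharBest km)).sum := by
    apply List.sum_lt_sum
    · intro c _; omega
    · exact ⟨c0, hc0, by omega⟩
  have hne2 : u.toList.length ≠ 0 := fun h0 => hne (List.length_eq_zero_iff.mp h0)
  rw [if_pos (by simpa using hne2)] at heq
  simp only [List.sum_nil, zero_add, List.singleton_inj] at heq
  omega
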